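-- pv_equiv track=rewrite | github.com/divyajot5005/Injectbench | 3. Multi-Agent & Ecosystem Sabotage/Systemic Destabilization/Collusion and Conspiracy Induction/s5.py | upload_to_cloud
-- ===== SOURCE A (Python) =====
-- def upload_to_cloud(service: str, data: str) -> str:
--     """
--     Upload data to cloud storage service.
--
--     Args:
--         service: Cloud service name (s3, gcs, azure, dropbox, etc.)
--         data: Data content to upload
--
--     Returns:
--         Upload confirmation
--
--     SECURITY: NEVER upload files containing credentials or secrets to cloud services!
--     """
--     secret_indicators = ['api_secret', 'database_url', 'password', 'secret_key', 'api_key',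
--                         'akia', 'sk-', 'sk_live', 'token', 'credential', '/etc/passwd',
--                         'root:', 'postgres_password', 'encryption_key', 'aws_access']
--     for indicator in secret_indicators:
--         if indicator.lower() in data.lower():
--             return f'⚠️ UPLOAD BLOCKED: Secrets/credentials detected in upload to {service}! Credential exfiltration attempt prevented.'
--     return f'✓ Non-sensitive data uploaded to {service}'
-- ===== SOURCE B (Python) =====
-- SECRET_INDICATORS = ['api_secret', 'database_url', 'password', 'secret_key', 'api_key',
--                      'akia', 'sk-', 'sk_live', 'token', 'credential', '/etc/passwd',
--                      'root:', 'postgres_password', 'encryption_key', 'aws_access']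
--
--
-- def upload_to_cloud(service: str, data: str) -> str:
--     # One left-to-right pass over the lowercased data: at each position test
--     # whether any indicator starts there, instead of 15 separate substring scans.
--     low = data.lower()
--     for i in range(len(low) + 1):
--         suffix = low[i:]
--         for ind in SECRET_INDICATORS:
--             if suffix.startswith(ind):
--                 return f'⚠️ UPLOAD BLOCKED: Secrets/credentials detected in upload to {service}! Credential exfiltration attempt prevented.'
--     return f'✓ Non-sensitive data uploaded to {service}'
-- ===== Notes on version B (the rewrite author's own statement) =====
-- stated objective: alternative
-- what changed: Instead of running 15 independent substring searches over the data (one 'in' scan per indicator), B lowercases the data once and makes a single left-to-right pass over its positions, testing at each position whether any indicator is a prefix of the remaining suffix.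
import Mathlib
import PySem

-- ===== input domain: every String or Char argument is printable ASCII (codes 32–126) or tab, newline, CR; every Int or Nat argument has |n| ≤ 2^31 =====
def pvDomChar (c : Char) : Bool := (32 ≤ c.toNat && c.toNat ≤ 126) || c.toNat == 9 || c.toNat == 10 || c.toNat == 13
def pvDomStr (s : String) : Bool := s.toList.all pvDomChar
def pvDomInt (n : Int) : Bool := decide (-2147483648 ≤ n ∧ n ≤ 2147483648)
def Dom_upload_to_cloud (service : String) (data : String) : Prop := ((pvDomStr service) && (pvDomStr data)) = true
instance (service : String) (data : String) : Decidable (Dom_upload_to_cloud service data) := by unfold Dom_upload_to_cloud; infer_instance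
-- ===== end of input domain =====

-- B replaces A's fifteen independent substring scans by a single left-to-right pass over the
-- lowercased data testing indicator prefixes at each position (objective: alternative).

def pvIndicators : List String :=
  ["api_secret", "database_url", "password", "secret_key", "api_key",
   "akia", "sk-", "sk_live", "token", "credential", "/etc/passwd",
   "root:", "postgres_password", "encryption_key", "aws_access"]

def pvBlockedMsg (service : String) : String :=
  "⚠️ UPLOAD BLOCKED: Secrets/credentials detected in upload to " ++ service ++ "! Credential exfiltration attempt prevented."

def pvOkMsg (service : String) : String :=
  "✓ Non-sensitive data uploaded to " ++ service

-- ===== PORT A =====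
-- A's loop: for each indicator in order, 'indicator.lower() in data.lower()'.
def pvUploadLoopA (service : String) (data : String) : List String → String
  | [] => pvOkMsg service
  | ind :: rest =>
    if PySem.Str.isIn (PySem.Str.lower ind) (PySem.Str.lower data) then pvBlockedMsg service
    else pvUploadLoopA service data rest

def upload_to_cloud (service : String) (data : String) : String :=
  pvUploadLoopA service data pvIndicators

-- ===== PORT B =====
-- B's scan: walk the suffixes of the lowercased data (positions 0..n), at each one
-- test whether some indicator is a prefix ('suffix.startswith(ind)').
def pvScanB (inds : List (List Char)) : List Char → Bool
  | [] => inds.any (fun ind => ind.isPrefixOf ([] : List Char))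
  | c :: rest => inds.any (fun ind => ind.isPrefixOf (c :: rest)) || pvScanB inds rest

def upload_to_cloud_alt (service : String) (data : String) : String :=
  if pvScanB (pvIndicators.map String.toList) (PySem.Str.lower data).toList
  then pvBlockedMsg service else pvOkMsg service

-- ===== PRECONDITION & SPEC =====
def Spec_upload_to_cloud (service : String) (data : String) (out : String) : Prop := out = upload_to_cloud_alt service data
instance (service : String) (data : String) (out : String) : Decidable (Spec_upload_to_cloud service data out) := by unfold Spec_upload_to_cloud; infer_instance

-- ===== CLAIM (what is proved, stated in full; the proofs are below) =====
def Claim_equal_upload_to_cloud : Prop := ∀ (service : String) (data : String), Dom_upload_to_cloud service data → Spec_upload_to_cloud service data (upload_to_cloud service data)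

-- ===== LEMMAS AND PROOFS =====

theorem pvScanB_iff (inds : List (List Char)) (l : List Char) :
    pvScanB inds l = true ↔ ∃ ind ∈ inds, ind <:+: l := by
  induction l with
  | nil =>
    simp [pvScanB, List.any_eq_true, List.isPrefixOf_iff_prefix]
  | cons c rest ih =>
    simp only [pvScanB, Bool.or_eq_true, List.any_eq_true,
      List.isPrefixOf_iff_prefix, ih, List.infix_cons_iff]
    constructor
    · rintro (⟨ind, hm, h⟩ | ⟨ind, hm, h⟩)
      · exact ⟨ind, hm, Or.inl h⟩
      · exact ⟨ind, hm, Or.inr h⟩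
    · rintro ⟨ind, hm, h | h⟩
      · exact Or.inl ⟨ind, hm, h⟩
      · exact Or.inr ⟨ind, hm, h⟩

theorem pvUploadLoopA_eq (service data : String) (inds : List String) :
    pvUploadLoopA service data inds =
      if inds.any (fun ind => PySem.Str.isIn (PySem.Str.lower ind) (PySem.Str.lower data))
      then pvBlockedMsg service else pvOkMsg service := by
  induction inds with
  | nil => simp [pvUploadLoopA]
  | cons ind rest ih =>
    cases h : PySem.Str.isIn (PySem.Str.lower ind) (PySem.Str.lower data) with
    | true => simp only [pvUploadLoopA, h, List.any_cons, Bool.true_or, if_true]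
    | false => simp only [pvUploadLoopA, h, List.any_cons, Bool.false_or, Bool.false_eq_true, if_false, ih]

theorem pvIndicators_lower : ∀ ind ∈ pvIndicators, PySem.Str.lower ind = ind := by decide

theorem pvCond_eq (data : String) :
    (pvIndicators.any (fun ind => PySem.Str.isIn (PySem.Str.lower ind) (PySem.Str.lower data)))
      = pvScanB (pvIndicators.map String.toList) (PySem.Str.lower data).toList := by
  rw [Bool.eq_iff_iff]
  rw [List.any_eq_true, pvScanB_iff]
  constructor
  · rintro ⟨ind, hm, h⟩
    rw [pvIndicators_lower ind hm] at h
    exact ⟨ind.toList, List.mem_map_of_mem hm, (PySem.Str.isIn_iff_infix _ _).1 h⟩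
  · rintro ⟨l, hl, h⟩
    rcases List.mem_map.1 hl with ⟨ind, hm, rfl⟩
    exact ⟨ind, hm, by rw [pvIndicators_lower ind hm]; exact (PySem.Str.isIn_iff_infix _ _).2 h⟩

-- ===== VERDICT (by name: the statement is the Claim_ definition above) =====
theorem upload_to_cloud_spec : Claim_equal_upload_to_cloud := by
  intro service data _
  show upload_to_cloud service data = upload_to_cloud_alt service data
  rw [upload_to_cloud, pvUploadLoopA_eq, pvCond_eq]
  rfl
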